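-- pv_equiv track=rewrite | github.com/laha12/s_d_r | paper/ns3_experiments_ucb_iridium_66_6/group_ucb_log_by_uid.py | status_of
-- ===== SOURCE A (Python) =====
-- def status_of(events):
--     has_arrive = any(e["event"] == "ARRIVE" for e in events)
--     has_drop = any(e["event"].startswith("DROP") for e in events)
--     has_forward_to_dst = any(
--         e["event"] == "FWD"
--         and e.get("dry_run") == "0"
--         and e.get("selected")
--         and e.get("dst")
--         and e.get("selected") == e.get("dst")
--         for e in events
--     )
--     if has_arrive and has_drop:
--         return "ARRIVE_WITH_DROP"
--     if has_arrive:
--         return "ARRIVE"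
--     if has_forward_to_dst and has_drop:
--         return "FORWARDED_TO_DST_WITH_DROP"
--     if has_forward_to_dst:
--         return "FORWARDED_TO_DST"
--     if has_drop:
--         return "DROP"
--     return "IN_PROGRESS"
-- ===== SOURCE B (Python) =====
-- _STATUS_TABLE = (
--     "IN_PROGRESS",                 # 0b000
--     "DROP",                        # 0b001
--     "FORWARDED_TO_DST",            # 0b010
--     "FORWARDED_TO_DST_WITH_DROP",  # 0b011
--     "ARRIVE",                      # 0b100
--     "ARRIVE_WITH_DROP",            # 0b101
--     "ARRIVE",                      # 0b110
--     "ARRIVE_WITH_DROP",            # 0b111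
-- )
--
-- def status_of(events):
--     mask = 0
--     for e in events:
--         ev = e["event"]
--         bit = 0
--         if ev == "ARRIVE":
--             bit |= 4
--         if (ev == "FWD"
--                 and e.get("dry_run") == "0"
--                 and e.get("selected")
--                 and e.get("dst")
--                 and e.get("selected") == e.get("dst")):
--             bit |= 2
--         if ev.startswith("DROP"):
--             bit |= 1
--         mask |= bit
--     return _STATUS_TABLE[mask]
-- ===== Notes on version B (the rewrite author's own statement) =====
-- stated objective: alternative
-- what changed: B replaces the three boolean any() scans and the five-way if-cascade with a bitmask algorithm: each event is classified once into a 3-bit code (ARRIVE=4, forward-to-dst=2, DROP=1), the codes are OR-reduced over the list, and the status string is read from an 8-entry lookup table indexed by the mask.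
import Mathlib
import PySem

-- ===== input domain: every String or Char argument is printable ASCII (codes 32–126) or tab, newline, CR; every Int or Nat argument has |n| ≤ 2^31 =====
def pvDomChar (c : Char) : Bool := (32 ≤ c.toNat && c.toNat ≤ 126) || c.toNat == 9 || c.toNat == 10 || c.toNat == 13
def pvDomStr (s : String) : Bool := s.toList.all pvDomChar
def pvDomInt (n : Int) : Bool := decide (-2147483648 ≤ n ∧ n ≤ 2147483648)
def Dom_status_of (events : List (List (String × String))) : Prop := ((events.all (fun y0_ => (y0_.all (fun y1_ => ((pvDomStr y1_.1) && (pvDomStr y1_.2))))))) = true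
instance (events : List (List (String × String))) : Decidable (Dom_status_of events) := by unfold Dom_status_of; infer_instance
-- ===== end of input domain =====

-- B replaces A's three any() scans + if-cascade with a per-event 3-bit code, an
-- OR-reduction of the codes, and an 8-entry table lookup (alternative algorithm, same cost class).


-- Python truthiness of an Optional[str]: None and "" are falsy (shared semantic helper).
def pvTruthyS (o : Option String) : Bool :=
  match o with
  | some s => s != ""
  | none => false

-- ===== PORT A =====
-- e["event"] is ported as (e.lookup "event").getD ""; under Pre_status_of the key is
-- always present, so the default is never taken (a missing key is a KeyError, excluded).
def status_of (events : List (List (String × String))) : String :=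
  let has_arrive := events.any (fun e => ((e.lookup "event").getD "") == "ARRIVE")
  let has_drop := events.any (fun e => PySem.Str.startswith ((e.lookup "event").getD "") "DROP")
  let has_forward_to_dst := events.any (fun e =>
    (((e.lookup "event").getD "") == "FWD")
    && (e.lookup "dry_run" == some "0")
    && pvTruthyS (e.lookup "selected")
    && pvTruthyS (e.lookup "dst")
    && (e.lookup "selected" == e.lookup "dst"))
  if has_arrive && has_drop then "ARRIVE_WITH_DROP"
  else if has_arrive then "ARRIVE"
  else if has_forward_to_dst && has_drop then "FORWARDED_TO_DST_WITH_DROP"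
  else if has_forward_to_dst then "FORWARDED_TO_DST"
  else if has_drop then "DROP"
  else "IN_PROGRESS"

-- ===== PORT B =====
-- Source B: each event yields a 3-bit code (ARRIVE=4, forward-to-dst=2, DROP=1),
-- the codes are OR-folded into a mask, and the status is _STATUS_TABLE[mask].
def pvStatusTable : List String :=
  ["IN_PROGRESS", "DROP", "FORWARDED_TO_DST", "FORWARDED_TO_DST_WITH_DROP",
   "ARRIVE", "ARRIVE_WITH_DROP", "ARRIVE", "ARRIVE_WITH_DROP"]

def status_of_alt (events : List (List (String × String))) : String :=
  let mask := events.foldl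
    (fun (m : Nat) e =>
      let ev := (e.lookup "event").getD ""
      let bit : Nat := 0
      let bit := if ev == "ARRIVE" then bit ||| 4 else bit
      let bit := if (ev == "FWD")
          && (e.lookup "dry_run" == some "0")
          && pvTruthyS (e.lookup "selected")
          && pvTruthyS (e.lookup "dst")
          && (e.lookup "selected" == e.lookup "dst") then bit ||| 2 else bit
      let bit := if PySem.Str.startswith ev "DROP" then bit ||| 1 else bit
      m ||| bit)
    0
  pvStatusTable.getD mask "IN_PROGRESS"

-- ===== PRECONDITION & SPEC =====
-- Pre_ excludes lists containing an event without the "event" key: there Python B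
-- raises KeyError at that event, and A usually raises too (A returns only when all
-- three scans happen to short-circuit before the malformed event).
def Pre_status_of (events : List (List (String × String))) : Prop :=
  (events.all (fun e => (e.lookup "event").isSome)) = true
instance (events : List (List (String × String))) : Decidable (Pre_status_of events) := by
  unfold Pre_status_of; infer_instance
def pvWitness_status_of : (List (List (String × String))) := [[("event", "ARRIVE")]]

def Spec_status_of (events : List (List (String × String))) (out : String) : Prop := out = status_of_alt events
instance (events : List (List (String × String))) (out : String) : Decidable (Spec_status_of events out) := by unfold Spec_status_of; infer_instance

-- ===== CLAIM (what is proved, stated in full; the proofs are below) =====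
def Claim_equal_status_of : Prop := ∀ (events : List (List (String × String))), Dom_status_of events → Pre_status_of events → Spec_status_of events (status_of events)

-- ===== LEMMAS AND PROOFS =====

-- local AC helper for Nat.lor
theorem pv_lor_left_comm (a b c : Nat) : a ||| (b ||| c) = b ||| (a ||| c) := by
  rw [← Nat.lor_assoc, Nat.lor_comm a b, Nat.lor_assoc]

-- the OR-fold of per-event bit codes equals the bits of the three any-scans
theorem pv_fold_eq_any (p1 p2 p3 : List (String × String) → Bool)
    (l : List (List (String × String))) (m : Nat) :
    l.foldl
      (fun (m : Nat) e =>
        let bit : Nat := 0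
        let bit := if p1 e then bit ||| 4 else bit
        let bit := if p2 e then bit ||| 2 else bit
        let bit := if p3 e then bit ||| 1 else bit
        m ||| bit) m
    = m ||| ((if l.any p1 then 4 else 0) ||| (if l.any p2 then 2 else 0) |||
             (if l.any p3 then 1 else 0)) := by
  induction l generalizing m with
  | nil => simp
  | cons e t ih =>
      simp only [List.foldl_cons, List.any_cons, ih]
      by_cases h1 : p1 e <;> by_cases h2 : p2 e <;> by_cases h3 : p3 e <;>
        by_cases t1 : t.any p1 <;> by_cases t2 : t.any p2 <;> by_cases t3 : t.any p3 <;>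
        simp [h1, h2, h3, t1, t2, t3, Nat.lor_assoc, Nat.lor_comm, pv_lor_left_comm]

-- ===== VERDICT (by name: the statement is the Claim_ definition above) =====
theorem status_of_spec : Claim_equal_status_of := by
  intro events _ _
  show status_of events = status_of_alt events
  unfold status_of status_of_alt
  rw [pv_fold_eq_any]
  cases ha : events.any (fun e => ((e.lookup "event").getD "") == "ARRIVE") <;>
    cases hf : events.any (fun e =>
      (((e.lookup "event").getD "") == "FWD")
      && (e.lookup "dry_run" == some "0")
      && pvTruthyS (e.lookup "selected")
      && pvTruthyS (e.lookup "dst")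
      && (e.lookup "selected" == e.lookup "dst")) <;>
    cases hd : events.any (fun e => PySem.Str.startswith ((e.lookup "event").getD "") "DROP") <;>
      simp only [ha, hf, hd] <;> decide
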